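-- pv_equiv track=rewrite | github.com/namrathaov/Social-Ogmentation | assignment1/assignment_2.py | find_significant_energy_increase_overlapping
-- ===== SOURCE A (Python) =====
-- def find_significant_energy_increase_overlapping(A):
--     sum = 0
--     left = float('-inf')
--     mid  = int(len(A)/2)
--     max_i = -1
--     max_j = -1
--     for i in range(mid,1,-1):
--         sum = sum + (A[i]-A[i-1])
--         if(left < sum):
--             left = sum;
--             max_i = i-1
--
--     sum = 0
--     right = float('-inf')
--     for i in range(mid-1,len(A)-1):
--         sum+=(A[i+1] - A[i])
--         if(right<sum):
--             right = sum
--             max_j = i+1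
--     return (max_i,max_j)
-- ===== SOURCE B (Python) =====
-- def find_significant_energy_increase_overlapping(A):
--     n = len(A)
--     mid = n // 2
--     max_i = -1
--     best = None
--     for p in range(1, mid):
--         if best is None or A[p] <= best:
--             best = A[p]
--             max_i = p
--     max_j = -1
--     best = None
--     for q in range(mid, n):
--         if best is None or A[q] > best:
--             best = A[q]
--             max_j = q
--     return (max_i, max_j)
-- ===== Notes on version B (the rewrite author's own statement) =====
-- stated objective: simpler
-- what changed: The telescoping difference sums are eliminated: instead of accumulating A[i]-A[i-1] deltas with a running best sum and a float('-inf') sentinel over a descending and an ascending loop, B directly scans for the largest-index minimum of A[1:mid] and the smallest-index maximum of A[mid:], with less per-iteration state and arithmetic.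
import Mathlib
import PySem

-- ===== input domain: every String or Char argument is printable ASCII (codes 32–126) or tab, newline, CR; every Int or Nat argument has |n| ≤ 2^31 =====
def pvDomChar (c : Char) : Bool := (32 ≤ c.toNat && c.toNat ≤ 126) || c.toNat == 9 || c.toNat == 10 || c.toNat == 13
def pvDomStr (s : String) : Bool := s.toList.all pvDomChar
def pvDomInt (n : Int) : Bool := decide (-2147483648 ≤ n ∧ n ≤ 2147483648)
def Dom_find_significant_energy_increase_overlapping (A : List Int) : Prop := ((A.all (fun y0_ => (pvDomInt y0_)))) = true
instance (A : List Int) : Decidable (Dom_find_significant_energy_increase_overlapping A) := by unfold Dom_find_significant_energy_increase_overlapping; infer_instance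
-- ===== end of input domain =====

-- B replaces A's telescoping difference sums (running best sum vs -inf over a descending and an
-- ascending loop) by two direct scans: largest-index minimum of A[1:mid], smallest-index maximum
-- of A[mid:]; objective: simpler. All Python index accesses are in range (incl. the A[-1] wrap at
-- len(A)=1), so the ports use the total pyGetD form.

-- ===== PORT A =====
-- loop body of A's first loop (state: sum, left as Option Int with none = -inf, max_i)
def pvStepL (A : List Int) (st : Int × Option Int × Int) (i : Int) : Int × Option Int × Int :=
  let s := st.1 + (PySem.List.pyGetD A i 0 - PySem.List.pyGetD A (i - 1) 0)
  match st.2.1 with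
  | none => (s, some s, i - 1)
  | some l => if l < s then (s, some s, i - 1) else (s, st.2.1, st.2.2)

-- loop body of A's second loop (state: sum, right, max_j)
def pvStepR (A : List Int) (st : Int × Option Int × Int) (i : Int) : Int × Option Int × Int :=
  let s := st.1 + (PySem.List.pyGetD A (i + 1) 0 - PySem.List.pyGetD A i 0)
  match st.2.1 with
  | none => (s, some s, i + 1)
  | some r => if r < s then (s, some s, i + 1) else (s, st.2.1, st.2.2)

def find_significant_energy_increase_overlapping (A : List Int) : Int × Int :=
  let mid : Int := (A.length : Int) / 2   -- int(len(A)/2): exact floor for a nonnegative length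
  let st1 := (PySem.List.pyRange mid 1 (-1)).foldl (pvStepL A) (0, none, -1)
  let st2 := (PySem.List.pyRange (mid - 1) ((A.length : Int) - 1) 1).foldl (pvStepR A) (0, none, -1)
  (st1.2.2, st2.2.2)

-- ===== PORT B =====
-- running-min scan, ties update (largest index of the minimum wins); best = none before any element
def pvStepMin (A : List Int) (st : Option Int × Int) (p : Int) : Option Int × Int :=
  match st.1 with
  | none => (some (PySem.List.pyGetD A p 0), p)
  | some b => if PySem.List.pyGetD A p 0 ≤ b then (some (PySem.List.pyGetD A p 0), p) else st

-- running-max scan, strict update only (smallest index of the maximum wins)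
def pvStepMax (A : List Int) (st : Option Int × Int) (q : Int) : Option Int × Int :=
  match st.1 with
  | none => (some (PySem.List.pyGetD A q 0), q)
  | some b => if b < PySem.List.pyGetD A q 0 then (some (PySem.List.pyGetD A q 0), q) else st

def find_significant_energy_increase_overlapping_alt (A : List Int) : Int × Int :=
  let n : Int := A.length
  let mid : Int := PySem.Int.floordiv n 2
  let s1 := (PySem.List.pyRange 1 mid 1).foldl (pvStepMin A) (none, -1)
  let s2 := (PySem.List.pyRange mid n 1).foldl (pvStepMax A) (none, -1)
  (s1.2, s2.2)

-- ===== PRECONDITION & SPEC =====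
def Spec_find_significant_energy_increase_overlapping (A : List Int) (out : Int × Int) : Prop := out = find_significant_energy_increase_overlapping_alt A
instance (A : List Int) (out : Int × Int) : Decidable (Spec_find_significant_energy_increase_overlapping A out) := by unfold Spec_find_significant_energy_increase_overlapping; infer_instance

-- ===== CLAIM (what is proved, stated in full; the proofs are below) =====
def Claim_equal_find_significant_energy_increase_overlapping : Prop := ∀ (A : List Int), Dom_find_significant_energy_increase_overlapping A → Spec_find_significant_energy_increase_overlapping A (find_significant_energy_increase_overlapping A)

-- ===== LEMMAS AND PROOFS =====

-- generic (value, index) selection steps used to characterise both programs' folds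
def pvMnLt (st : Option Int × Int) (x : Int × Int) : Option Int × Int :=
  match st.1 with
  | none => (some x.1, x.2)
  | some b => if x.1 < b then (some x.1, x.2) else st

def pvMnLe (st : Option Int × Int) (x : Int × Int) : Option Int × Int :=
  match st.1 with
  | none => (some x.1, x.2)
  | some b => if x.1 ≤ b then (some x.1, x.2) else st

def pvMxLt (st : Option Int × Int) (x : Int × Int) : Option Int × Int :=
  match st.1 with
  | none => (some x.1, x.2)
  | some b => if b < x.1 then (some x.1, x.2) else st

-- prefix-sum/index pairs generated by A's two loops
def pvPairsL (A : List Int) (s0 : Int) : List Int → List (Int × Int)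
  | [] => []
  | i :: t =>
      let s := s0 + (PySem.List.pyGetD A i 0 - PySem.List.pyGetD A (i - 1) 0)
      (s, i - 1) :: pvPairsL A s t

def pvPairsR (A : List Int) (s0 : Int) : List Int → List (Int × Int)
  | [] => []
  | i :: t =>
      let s := s0 + (PySem.List.pyGetD A (i + 1) 0 - PySem.List.pyGetD A i 0)
      (s, i + 1) :: pvPairsR A s t

lemma pvStepL_snd (A : List Int) : ∀ (l : List Int) (s0 : Int) (mj : Option Int × Int),
    (l.foldl (pvStepL A) (s0, mj)).2 = (pvPairsL A s0 l).foldl pvMxLt mj := by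
  intro l
  induction l with
  | nil => intro s0 mj; rfl
  | cons i t ih =>
      intro s0 mj
      have h : pvStepL A (s0, mj) i
          = (s0 + (PySem.List.pyGetD A i 0 - PySem.List.pyGetD A (i - 1) 0),
             pvMxLt mj (s0 + (PySem.List.pyGetD A i 0 - PySem.List.pyGetD A (i - 1) 0), i - 1)) := by
        cases mj with
        | mk m j =>
          cases m with
          | none => rfl
          | some b => simp [pvStepL, pvMxLt]; split <;> rfl
      simp [List.foldl, h, ih, pvPairsL]

lemma pvStepR_snd (A : List Int) : ∀ (l : List Int) (s0 : Int) (mj : Option Int × Int),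
    (l.foldl (pvStepR A) (s0, mj)).2 = (pvPairsR A s0 l).foldl pvMxLt mj := by
  intro l
  induction l with
  | nil => intro s0 mj; rfl
  | cons i t ih =>
      intro s0 mj
      have h : pvStepR A (s0, mj) i
          = (s0 + (PySem.List.pyGetD A (i + 1) 0 - PySem.List.pyGetD A i 0),
             pvMxLt mj (s0 + (PySem.List.pyGetD A (i + 1) 0 - PySem.List.pyGetD A i 0), i + 1)) := by
        cases mj with
        | mk m j =>
          cases m with
          | none => rfl
          | some b => simp [pvStepR, pvMxLt]; split <;> rfl
      simp [List.foldl, h, ih, pvPairsR]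

lemma pvStepMin_eq (A : List Int) : ∀ (l : List Int) (st : Option Int × Int),
    l.foldl (pvStepMin A) st
      = (l.map (fun p => (PySem.List.pyGetD A p 0, p))).foldl pvMnLe st := by
  intro l
  induction l with
  | nil => intro st; rfl
  | cons p t ih =>
      intro st
      have h : pvStepMin A st p = pvMnLe st (PySem.List.pyGetD A p 0, p) := by
        cases st with
        | mk m j => cases m with
          | none => rfl
          | some b => rfl
      simp [List.foldl, h, ih]

lemma pvStepMax_eq (A : List Int) : ∀ (l : List Int) (st : Option Int × Int),
    l.foldl (pvStepMax A) st
      = (l.map (fun q => (PySem.List.pyGetD A q 0, q))).foldl pvMxLt st := by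
  intro l
  induction l with
  | nil => intro st; rfl
  | cons q t ih =>
      intro st
      have h : pvStepMax A st q = pvMxLt st (PySem.List.pyGetD A q 0, q) := by
        cases st with
        | mk m j => cases m with
          | none => rfl
          | some b => rfl
      simp [List.foldl, h, ih]

-- telescoping of A's left loop: descending contiguous range from k down to 2
lemma pvPairsL_range (A : List Int) (c : Int) : ∀ (k : Nat),
    pvPairsL A (c - PySem.List.pyGetD A (k : Int) 0) (PySem.List.pyRange (k : Int) 1 (-1))
      = (PySem.List.pyRange (k : Int) 1 (-1)).map
          (fun t => (c - PySem.List.pyGetD A (t - 1) 0, t - 1)) := by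
  intro k
  induction k with
  | zero => simp [PySem.List.pyRange_neg_one_eq_nil (by norm_num : (0:Int) ≤ 1), pvPairsL]
  | succ m ih =>
      by_cases hm : (m : Int) + 1 ≤ 1
      · push_cast
        simp [PySem.List.pyRange_neg_one_eq_nil hm, pvPairsL]
      · push_cast at ih ⊢
        rw [PySem.List.pyRange_neg_one_cons (by omega : (1:Int) < (m : Int) + 1)]
        simp only [pvPairsL, List.map_cons]
        rw [show (m : Int) + 1 - 1 = (m : Int) by ring]
        rw [show c - PySem.List.pyGetD A ((m : Int) + 1) 0
              + (PySem.List.pyGetD A ((m : Int) + 1) 0 - PySem.List.pyGetD A ((m : Int)) 0)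
              = c - PySem.List.pyGetD A ((m : Int)) 0 by ring]
        rw [ih]

-- telescoping of A's right loop: ascending contiguous range of length k from a
lemma pvPairsR_range (A : List Int) (c : Int) : ∀ (k : Nat) (a : Int),
    pvPairsR A (PySem.List.pyGetD A a 0 - c) (PySem.List.pyRange a (a + (k : Int)) 1)
      = (PySem.List.pyRange a (a + (k : Int)) 1).map
          (fun t => (PySem.List.pyGetD A (t + 1) 0 - c, t + 1)) := by
  intro k
  induction k with
  | zero => intro a; simp [pvPairsR]
  | succ m ih =>
      intro a
      rw [PySem.List.pyRange_one_cons (by push_cast; omega : a < a + ((m + 1 : Nat) : Int))]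
      simp only [pvPairsR, List.map_cons]
      rw [show PySem.List.pyGetD A a 0 - c
            + (PySem.List.pyGetD A (a + 1) 0 - PySem.List.pyGetD A a 0)
            = PySem.List.pyGetD A (a + 1) 0 - c by ring]
      rw [show a + ((m + 1 : Nat) : Int) = (a + 1) + ((m : Nat) : Int) by push_cast; ring]
      rw [ih (a + 1)]

-- constant offset does not change a strict-max scan's choice
lemma pvMxLt_offset (c : Int) : ∀ (l : List (Int × Int)) (m : Option Int) (j : Int),
    ((l.map (fun x => (x.1 - c, x.2))).foldl pvMxLt (m.map (· - c), j))
      = ((l.foldl pvMxLt (m, j)).1.map (· - c), (l.foldl pvMxLt (m, j)).2) := by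
  intro l
  induction l with
  | nil => intro m j; rfl
  | cons x t ih =>
      intro m j
      cases m with
      | none =>
          simp only [List.map_cons, List.foldl, pvMxLt, Option.map_none]
          simpa using ih (some x.1) x.2
      | some b =>
          simp only [List.map_cons, List.foldl, pvMxLt, Option.map_some]
          by_cases h : b < x.1
          · rw [if_pos (by omega : b - c < x.1 - c), if_pos h]
            simpa using ih (some x.1) x.2
          · rw [if_neg (by omega : ¬ b - c < x.1 - c), if_neg h]
            simpa using ih (some b) j

-- reflecting values turns a strict-max scan into a strict-min scan
lemma pvMxLt_reflect (c : Int) : ∀ (l : List (Int × Int)) (m : Option Int) (j : Int),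
    ((l.map (fun x => (c - x.1, x.2))).foldl pvMxLt (m.map (c - ·), j))
      = ((l.foldl pvMnLt (m, j)).1.map (c - ·), (l.foldl pvMnLt (m, j)).2) := by
  intro l
  induction l with
  | nil => intro m j; rfl
  | cons x t ih =>
      intro m j
      cases m with
      | none =>
          simp only [List.map_cons, List.foldl, pvMxLt, pvMnLt, Option.map_none]
          simpa using ih (some x.1) x.2
      | some b =>
          simp only [List.map_cons, List.foldl, pvMxLt, pvMnLt, Option.map_some]
          by_cases h : x.1 < b
          · rw [if_pos (by omega : c - b < c - x.1), if_pos h]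
            simpa using ih (some x.1) x.2
          · rw [if_neg (by omega : ¬ c - b < c - x.1), if_neg h]
            simpa using ih (some b) j

-- combining a preloaded state with the result of the strict scan over the rest
def pvComb (r : Option Int × Int) (m0 j0 : Int) : Option Int × Int :=
  match r with
  | (none, _) => (some m0, j0)
  | (some m, j) => if m ≤ m0 then (some m, j) else (some m0, j0)

-- running an asc ≤-min scan from a preloaded state, in terms of the foldr (descending) strict scan
lemma pvMnLe_init : ∀ (t : List (Int × Int)) (m0 j0 j1 : Int),
    t.foldl pvMnLe (some m0, j0)
      = pvComb (t.foldr (fun x s => pvMnLt s x) ((none : Option Int), j1)) m0 j0 := by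
  intro t
  induction t with
  | nil => intro m0 j0 j1; rfl
  | cons y t' ih =>
      intro m0 j0 j1
      simp only [List.foldl, List.foldr]
      rcases hF : t'.foldr (fun x s => pvMnLt s x) ((none : Option Int), j1) with ⟨mo, jj⟩
      by_cases hy : y.1 ≤ m0
      · rw [show pvMnLe (some m0, j0) y = (some y.1, y.2) by simp [pvMnLe, hy]]
        rw [ih y.1 y.2 j1, hF]
        cases mo with
        | none => simp [pvMnLt, pvComb, hy]
        | some m =>
            simp only [pvMnLt]
            split_ifs
            all_goals simp only [pvComb]
            all_goals (split_ifs <;> first | rfl | (exfalso; omega))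
      · rw [show pvMnLe (some m0, j0) y = (some m0, j0) by simp [pvMnLe, hy]]
        rw [ih m0 j0 j1, hF]
        cases mo with
        | none => simp [pvMnLt, pvComb]; omega
        | some m =>
            simp only [pvMnLt]
            split_ifs
            all_goals simp only [pvComb]
            all_goals (split_ifs <;> first | rfl | (exfalso; omega))

-- a descending strict-min scan equals the ascending ≤-min scan (largest index of the minimum)
lemma pvMnLt_reverse : ∀ (l : List (Int × Int)) (j1 : Int),
    l.reverse.foldl pvMnLt ((none : Option Int), j1) = l.foldl pvMnLe ((none : Option Int), j1) := by
  have main : ∀ (l : List (Int × Int)) (j1 : Int),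
      l.foldr (fun x s => pvMnLt s x) ((none : Option Int), j1)
        = l.foldl pvMnLe ((none : Option Int), j1) := by
    intro l
    induction l with
    | nil => intro j1; rfl
    | cons x t ih =>
        intro j1
        simp only [List.foldr, List.foldl]
        rw [show pvMnLe ((none : Option Int), j1) x = (some x.1, x.2) from rfl]
        rw [pvMnLe_init t x.1 x.2 j1]
        rw [ih j1] at *
        rcases hF : t.foldl pvMnLe ((none : Option Int), j1) with ⟨mo, jj⟩
        cases mo with
        | none => simp [pvMnLt, pvComb]
        | some m =>
            simp only [pvMnLt]
            split_ifs
            all_goals simp only [pvComb]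
            all_goals (split_ifs <;> first | rfl | (exfalso; omega))
  intro l j1
  rw [List.foldl_reverse]
  exact main l j1

-- shifting a contiguous range by d while unshifting inside the mapped function
lemma pvMap_range_shift (g : Int → Int × Int) (a b d : Int) :
    (PySem.List.pyRange (a + d) (b + d) 1).map (fun t => g (t - d))
      = (PySem.List.pyRange a b 1).map g := by
  rw [PySem.List.pyRange_one, PySem.List.pyRange_one, List.map_map, List.map_map]
  rw [show (b + d) - (a + d) = b - a by ring]
  apply List.map_congr_left
  intro k _
  simp [Function.comp]
  congr 1
  ring

theorem find_significant_energy_increase_overlapping_spec_aux (A : List Int) :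
    find_significant_energy_increase_overlapping A = find_significant_energy_increase_overlapping_alt A := by
  unfold find_significant_energy_increase_overlapping find_significant_energy_increase_overlapping_alt
  simp only []
  have hmid : PySem.Int.floordiv (A.length : Int) 2 = (A.length : Int) / 2 :=
    PySem.Int.floordiv_eq_ediv_of_pos (by norm_num)
  rw [hmid]
  set n : Int := (A.length : Int) with hn
  set mid : Int := n / 2 with hmidd
  have hmid0 : 0 ≤ mid := by
    have : (0:Int) ≤ n := by simp [hn]
    omega
  have hmidn : mid ≤ n := by
    have h0 : (0:Int) ≤ n := by simp [hn]
    omega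
  rw [Prod.mk.injEq]
  constructor
  · -- left components
    rw [pvStepL_snd]
    have hk : mid = ((mid.toNat : Nat) : Int) := by omega
    have htele := pvPairsL_range A (PySem.List.pyGetD A mid 0) mid.toNat
    rw [← hk] at htele
    rw [show (0:Int) = PySem.List.pyGetD A mid 0 - PySem.List.pyGetD A mid 0 by ring, htele]
    rw [show ((PySem.List.pyRange mid 1 (-1)).map
          (fun t => (PySem.List.pyGetD A mid 0 - PySem.List.pyGetD A (t - 1) 0, t - 1)))
        = ((PySem.List.pyRange mid 1 (-1)).map (fun t => (PySem.List.pyGetD A (t - 1) 0, t - 1))).map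
            (fun x => (PySem.List.pyGetD A mid 0 - x.1, x.2)) by
      rw [List.map_map]; rfl]
    have hrefl := pvMxLt_reflect (PySem.List.pyGetD A mid 0)
      ((PySem.List.pyRange mid 1 (-1)).map (fun t => (PySem.List.pyGetD A (t - 1) 0, t - 1)))
      none (-1)
    simp only [Option.map_none] at hrefl
    rw [hrefl]
    rw [PySem.List.pyRange_neg_one_eq_reverse, List.map_reverse, pvMnLt_reverse]
    rw [show ((PySem.List.pyRange (1 + 1) (mid + 1) 1).map
          (fun t => (PySem.List.pyGetD A (t - 1) 0, t - 1)))
        = (PySem.List.pyRange 1 mid 1).map (fun p => (PySem.List.pyGetD A p 0, p)) by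
      have := pvMap_range_shift (fun p => (PySem.List.pyGetD A p 0, p)) 1 mid 1
      simpa using this]
    rw [pvStepMin_eq]
  · -- right components
    rw [pvStepR_snd]
    have hk : n - 1 = (mid - 1) + (((n - mid).toNat : Nat) : Int) := by omega
    have htele := pvPairsR_range A (PySem.List.pyGetD A (mid - 1) 0) (n - mid).toNat (mid - 1)
    rw [← hk] at htele
    rw [show (0:Int) = PySem.List.pyGetD A (mid - 1) 0 - PySem.List.pyGetD A (mid - 1) 0 by ring,
      htele]
    rw [show ((PySem.List.pyRange (mid - 1) (n - 1) 1).map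
          (fun t => (PySem.List.pyGetD A (t + 1) 0 - PySem.List.pyGetD A (mid - 1) 0, t + 1)))
        = ((PySem.List.pyRange (mid - 1) (n - 1) 1).map
            (fun t => (PySem.List.pyGetD A (t + 1) 0, t + 1))).map
            (fun x => (x.1 - PySem.List.pyGetD A (mid - 1) 0, x.2)) by
      rw [List.map_map]; rfl]
    have hoff := pvMxLt_offset (PySem.List.pyGetD A (mid - 1) 0)
      ((PySem.List.pyRange (mid - 1) (n - 1) 1).map (fun t => (PySem.List.pyGetD A (t + 1) 0, t + 1)))
      none (-1)
    simp only [Option.map_none] at hoff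
    rw [hoff]
    rw [show ((PySem.List.pyRange (mid - 1) (n - 1) 1).map
          (fun t => (PySem.List.pyGetD A (t + 1) 0, t + 1)))
        = (PySem.List.pyRange mid n 1).map (fun q => (PySem.List.pyGetD A q 0, q)) by
      have := pvMap_range_shift (fun q => (PySem.List.pyGetD A q 0, q)) mid n (-1)
      simpa using this]
    rw [pvStepMax_eq]

-- ===== VERDICT (by name: the statement is the Claim_ definition above) =====
theorem find_significant_energy_increase_overlapping_spec : Claim_equal_find_significant_energy_increase_overlapping := by
  intro A _
  unfold Spec_find_significant_energy_increase_overlapping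
  exact find_significant_energy_increase_overlapping_spec_aux A
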